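-- pv_equiv track=rewrite | github.com/ptrisha/may2023-challenge | code/challenge4.py | order_sublists
-- ===== SOURCE A (Python) =====
-- def compute_loss(item, cost_dict):
--     '''
--     Computes total cost of the item adding costs of items which
--     share any of the workers in item.  Adds the total loss/cost
--     to item.
--     '''
--     loss=0
--     worker1, worker2= item[0]
--     for k in cost_dict:
--         if (worker1 in k) or (worker2 in k):
--             loss += cost_dict[k]
--     return loss
--
-- def order_sublists(l, cost_dict):
--     """
--     Order each sublist in list l according to ascending order of
--     total loss/cost.  Note that all items in the sublist have the
--     same (individual) cost.
--     """
--     new_list=[]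
--     for sublist in l:
--         subdict = {}
--         for it in sublist:
--             loss = compute_loss(it, cost_dict)
--             subdict[it[0]] = (it[1], loss)
--         ordered_sublist = sorted(subdict.items(), key=lambda x:x[1][1], reverse=True)
--         new_list.append(ordered_sublist)
--     return new_list
-- ===== SOURCE B (Python) =====
-- def order_sublists(l, cost_dict):
--     """
--     Order each sublist in list l according to ascending order of
--     total loss/cost.  Note that all items in the sublist have the
--     same (individual) cost.
--     """
--     # Precompute per-worker cost sums once; each loss is then O(1)
--     # by inclusion-exclusion instead of a scan over cost_dict.
--     per_worker = {}
--     for (a, b), c in cost_dict.items():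
--         per_worker[a] = per_worker.get(a, 0) + c
--         if b != a:
--             per_worker[b] = per_worker.get(b, 0) + c
--
--     def loss(w1, w2):
--         if w1 == w2:
--             return per_worker.get(w1, 0)
--         both = cost_dict.get((w1, w2), 0) + cost_dict.get((w2, w1), 0)
--         return per_worker.get(w1, 0) + per_worker.get(w2, 0) - both
--
--     new_list = []
--     for sublist in l:
--         sub = {}
--         for it in sublist:
--             sub[it[0]] = it[1]
--         new_list.append(sorted(((k, (v, loss(k[0], k[1]))) for k, v in sub.items()),
--                                key=lambda x: x[1][1], reverse=True))
--     return new_list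
-- ===== Notes on version B (the rewrite author's own statement) =====
-- stated objective: faster
-- what changed: Instead of scanning the whole cost_dict for every item, B precomputes a per-worker cost-sum table once and computes each pair's loss in O(1) by inclusion-exclusion (per-worker sums minus the cost of the pair's own key in either orientation), computing it once per distinct pair.
import Mathlib
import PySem

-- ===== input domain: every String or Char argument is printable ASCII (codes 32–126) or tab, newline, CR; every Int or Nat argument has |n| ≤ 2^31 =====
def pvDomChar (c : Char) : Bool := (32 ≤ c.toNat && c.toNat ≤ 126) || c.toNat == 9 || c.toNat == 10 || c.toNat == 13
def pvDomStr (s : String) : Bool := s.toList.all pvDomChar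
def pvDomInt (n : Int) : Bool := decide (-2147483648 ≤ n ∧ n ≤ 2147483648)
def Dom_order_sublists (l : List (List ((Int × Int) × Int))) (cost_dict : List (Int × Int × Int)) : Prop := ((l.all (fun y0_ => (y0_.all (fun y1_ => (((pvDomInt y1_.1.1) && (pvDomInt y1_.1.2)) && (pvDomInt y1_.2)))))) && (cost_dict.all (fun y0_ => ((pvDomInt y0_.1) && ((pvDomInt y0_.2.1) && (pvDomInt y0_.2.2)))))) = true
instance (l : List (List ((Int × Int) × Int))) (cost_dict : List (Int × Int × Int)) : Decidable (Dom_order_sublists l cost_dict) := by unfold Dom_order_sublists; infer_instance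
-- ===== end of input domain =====

-- B replaces A's per-item scan of cost_dict with precomputed per-worker sums and an
-- O(1) inclusion-exclusion loss per distinct pair (return value only; no mutation).

-- ===== PORT A =====
-- the dict argument, as Python builds it from the association list (last value wins, first position kept)
def pvMkCost (cost_dict : List (Int × Int × Int)) : PySem.Dict (Int × Int) Int :=
  PySem.Dict.ofList (cost_dict.map (fun e => ((e.1, e.2.1), e.2.2)))

def compute_loss (item : (Int × Int) × Int) (D : PySem.Dict (Int × Int) Int) : Int :=
  -- loss = 0; for k in cost_dict: if (worker1 in k) or (worker2 in k): loss += cost_dict[k]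
  D.items.foldl (fun loss kv =>
    if (item.1.1 = kv.1.1 ∨ item.1.1 = kv.1.2) ∨ (item.1.2 = kv.1.1 ∨ item.1.2 = kv.1.2)
    then loss + kv.2 else loss) 0

def order_sublists (l : List (List ((Int × Int) × Int))) (cost_dict : List (Int × Int × Int)) : List (List ((Int × Int) × (Int × Int))) :=
  let D := pvMkCost cost_dict
  l.foldl (fun new_list sublist =>
    let subdict := sublist.foldl (fun sd it => sd.insert it.1 (it.2, compute_loss it D)) PySem.Dict.empty
    new_list ++ [PySem.List.sorted subdict.items (fun x => x.2.2) true]) []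

-- ===== PORT B =====
def pvPerWorker (D : PySem.Dict (Int × Int) Int) : PySem.Dict Int Int :=
  D.items.foldl (fun s kv =>
    let s1 := s.modify kv.1.1 0 (· + kv.2)
    if kv.1.2 ≠ kv.1.1 then s1.modify kv.1.2 0 (· + kv.2) else s1) PySem.Dict.empty

def pvLoss (S : PySem.Dict Int Int) (D : PySem.Dict (Int × Int) Int) (w1 w2 : Int) : Int :=
  if w1 = w2 then S.getD w1 0
  else S.getD w1 0 + S.getD w2 0 - (D.getD (w1, w2) 0 + D.getD (w2, w1) 0)

def order_sublists_alt (l : List (List ((Int × Int) × Int))) (cost_dict : List (Int × Int × Int)) : List (List ((Int × Int) × (Int × Int))) :=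
  let D := pvMkCost cost_dict
  let S := pvPerWorker D
  l.map (fun sublist =>
    let sub := sublist.foldl (fun sd it => sd.insert it.1 it.2) PySem.Dict.empty
    PySem.List.sorted (sub.items.map (fun kv => (kv.1, (kv.2, pvLoss S D kv.1.1 kv.1.2))))
      (fun x => x.2.2) true)

-- ===== PRECONDITION & SPEC =====
def Spec_order_sublists (l : List (List ((Int × Int) × Int))) (cost_dict : List (Int × Int × Int)) (out : List (List ((Int × Int) × (Int × Int)))) : Prop := out = order_sublists_alt l cost_dict
instance (l : List (List ((Int × Int) × Int))) (cost_dict : List (Int × Int × Int)) (out : List (List ((Int × Int) × (Int × Int)))) : Decidable (Spec_order_sublists l cost_dict out) := by unfold Spec_order_sublists; infer_instance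

-- ===== CLAIM (what is proved, stated in full; the proofs are below) =====
def Claim_equal_order_sublists : Prop := ∀ (l : List (List ((Int × Int) × Int))) (cost_dict : List (Int × Int × Int)), Dom_order_sublists l cost_dict → Spec_order_sublists l cost_dict (order_sublists l cost_dict)

-- ===== LEMMAS AND PROOFS =====

-- A's loss loop as a sum over the dict items
lemma computeLoss_eq_sum (item : (Int × Int) × Int) (D : PySem.Dict (Int × Int) Int) :
    compute_loss item D =
      (D.items.map (fun kv =>
        if (item.1.1 = kv.1.1 ∨ item.1.1 = kv.1.2) ∨ (item.1.2 = kv.1.1 ∨ item.1.2 = kv.1.2)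
        then kv.2 else 0)).sum := by
  unfold compute_loss
  have h : (fun (a : Int) (kv : (Int × Int) × Int) =>
      if (item.1.1 = kv.1.1 ∨ item.1.1 = kv.1.2) ∨ (item.1.2 = kv.1.1 ∨ item.1.2 = kv.1.2)
      then a + kv.2 else a) =
      fun a kv => a + (if (item.1.1 = kv.1.1 ∨ item.1.1 = kv.1.2) ∨ (item.1.2 = kv.1.1 ∨ item.1.2 = kv.1.2) then kv.2 else 0) := by
    funext a kv; split <;> simp
  rw [h, PySem.List.foldl_add]
  simp

-- B's per-worker table reads back the single-worker sum
lemma perWorker_fold_getD (L : List ((Int × Int) × Int)) (w : Int) :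
    ∀ s : PySem.Dict Int Int,
    (L.foldl (fun s kv =>
      let s1 := s.modify kv.1.1 0 (· + kv.2)
      if kv.1.2 ≠ kv.1.1 then s1.modify kv.1.2 0 (· + kv.2) else s1) s).getD w 0
    = s.getD w 0 + (L.map (fun kv => if w = kv.1.1 ∨ w = kv.1.2 then kv.2 else 0)).sum := by
  induction L with
  | nil => simp
  | cons kv t ih =>
    intro s
    rw [List.foldl_cons, ih]
    simp only [List.map_cons, List.sum_cons]
    obtain ⟨⟨a, b⟩, c⟩ := kv
    by_cases hba : b = a <;> by_cases h1 : w = a <;> by_cases h2 : w = b <;>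
      simp only [ne_eq, hba, h1, h2, not_true_eq_false, not_false_eq_true, ite_true, ite_false,
        PySem.Dict.getD_modify] <;>
      simp_all <;> omega

lemma perWorker_getD (D : PySem.Dict (Int × Int) Int) (w : Int) :
    (pvPerWorker D).getD w 0 =
      (D.items.map (fun kv => if w = kv.1.1 ∨ w = kv.1.2 then kv.2 else 0)).sum := by
  unfold pvPerWorker
  rw [perWorker_fold_getD]
  simp [PySem.Dict.getD_empty]

-- dict lookup as a sum over items when keys are nodup
lemma sum_ite_key_eq_getD (d : PySem.Dict (Int × Int) Int) (h : d.keys.Nodup) (K : Int × Int) :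
    (d.items.map (fun kv => if kv.1 = K then kv.2 else 0)).sum = d.getD K 0 := by
  obtain ⟨L⟩ := d
  induction L with
  | nil => simp [PySem.Dict.getD, PySem.Dict.get?]
  | cons kv t ih =>
    obtain ⟨k, v⟩ := kv
    simp only [PySem.Dict.keys] at h ih ⊢
    simp only [List.map_cons, List.nodup_cons, List.mem_map] at h
    simp only [List.map_cons, List.sum_cons]
    rw [PySem.Dict.getD_eq_get?_getD, PySem.Dict.get?_mk_cons]
    by_cases hk : k = K
    · subst hk
      simp only [beq_self_eq_true, ite_true, Option.getD_some]
      have hz : (List.map (fun kv => if kv.1 = k then kv.2 else 0) t).sum = 0 := by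
        apply List.sum_eq_zero
        intro x hx
        simp only [List.mem_map] at hx
        obtain ⟨p, hp, rfl⟩ := hx
        have : p.1 ≠ k := fun hh => h.1 ⟨p, hp, hh⟩
        simp [this]
      omega
    · have hbk : (k == K) = false := by simp [hk]
      rw [hbk]
      simp only [if_neg hk, Bool.false_eq_true, ite_false, zero_add]
      rw [← PySem.Dict.getD_eq_get?_getD]
      exact ih h.2

-- pointwise inclusion-exclusion over the item list
lemma loss_split (w1 w2 : Int) (hne : w1 ≠ w2) (L : List ((Int × Int) × Int)) :
    (L.map (fun kv =>
        if (w1 = kv.1.1 ∨ w1 = kv.1.2) ∨ (w2 = kv.1.1 ∨ w2 = kv.1.2) then kv.2 else 0)).sum =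
    (L.map (fun kv => if w1 = kv.1.1 ∨ w1 = kv.1.2 then kv.2 else 0)).sum +
    (L.map (fun kv => if w2 = kv.1.1 ∨ w2 = kv.1.2 then kv.2 else 0)).sum -
    ((L.map (fun kv => if kv.1 = (w1, w2) then kv.2 else 0)).sum +
     (L.map (fun kv => if kv.1 = (w2, w1) then kv.2 else 0)).sum) := by
  induction L with
  | nil => simp
  | cons kv t ih =>
    obtain ⟨⟨a, b⟩, c⟩ := kv
    simp only [List.map_cons, List.sum_cons, Prod.mk.injEq] at ih ⊢
    split_ifs <;> omega

-- the two loss computations agree (for the dict, whose keys are nodup)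
lemma loss_agree (D : PySem.Dict (Int × Int) Int) (hnd : D.keys.Nodup)
    (item : (Int × Int) × Int) :
    compute_loss item D = pvLoss (pvPerWorker D) D item.1.1 item.1.2 := by
  rw [computeLoss_eq_sum]
  unfold pvLoss
  by_cases h : item.1.1 = item.1.2
  · rw [if_pos h, perWorker_getD]
    congr 1
    apply List.map_congr_left
    intro kv _
    rw [← h]
    simp [or_self]
  · rw [if_neg h, loss_split _ _ h, perWorker_getD, perWorker_getD,
      sum_ite_key_eq_getD D hnd, sum_ite_key_eq_getD D hnd]

-- mapping a dict's values commutes with insert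
lemma mapD_insert {α : Type} (g : (Int × Int) → Int → α) (d : PySem.Dict (Int × Int) Int)
    (k : Int × Int) (v : Int) :
    PySem.Dict.mk ((d.insert k v).items.map (fun kv => (kv.1, g kv.1 kv.2))) =
    (PySem.Dict.mk (d.items.map (fun kv => (kv.1, g kv.1 kv.2)))).insert k (g k v) := by
  apply PySem.Dict.ext
  rw [PySem.Dict.items_insert, PySem.Dict.items_insert]
  have hc : (PySem.Dict.mk (d.items.map (fun kv => (kv.1, g kv.1 kv.2)))).contains k = d.contains k := by
    simp [PySem.Dict.contains, List.any_map, Function.comp_def]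
  rw [hc]
  by_cases h : d.contains k
  · rw [if_pos h, if_pos h, List.map_map, List.map_map]
    apply List.map_congr_left
    intro p _
    by_cases hp : p.1 = k
    · simp [hp]
    · simp [hp]
  · rw [if_neg h, if_neg h, List.map_append]
    rfl

-- the A-side subdict is the B-side subdict with the loss attached
lemma subdict_items {α : Type} (g : (Int × Int) → Int → α) (sublist : List ((Int × Int) × Int)) :
    ∀ dB : PySem.Dict (Int × Int) Int,
    (sublist.foldl (fun sd it => sd.insert it.1 (g it.1 it.2)) (PySem.Dict.mk (dB.items.map (fun kv => (kv.1, g kv.1 kv.2))))).items =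
    ((sublist.foldl (fun sd it => sd.insert it.1 it.2) dB).items.map (fun kv => (kv.1, g kv.1 kv.2))) := by
  induction sublist with
  | nil => intro dB; rfl
  | cons it t ih =>
    intro dB
    rw [List.foldl_cons, List.foldl_cons, ← ih (dB.insert it.1 it.2), mapD_insert]

-- ===== VERDICT (by name: the statement is the Claim_ definition above) =====
theorem order_sublists_spec : Claim_equal_order_sublists := by
  intro l cost_dict _
  unfold Spec_order_sublists order_sublists order_sublists_alt
  rw [PySem.List.foldl_append_singleton_eq_map]
  apply List.map_congr_left
  intro sublist _
  have hnd : (pvMkCost cost_dict).keys.Nodup := PySem.Dict.nodup_keys_ofList _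
  have hf : (fun (sd : PySem.Dict (Int × Int) (Int × Int)) (it : (Int × Int) × Int) =>
        sd.insert it.1 (it.2, compute_loss it (pvMkCost cost_dict))) =
      fun sd it => sd.insert it.1
        ((fun (k : Int × Int) (v : Int) => (v, pvLoss (pvPerWorker (pvMkCost cost_dict)) (pvMkCost cost_dict) k.1 k.2)) it.1 it.2) := by
    funext sd it
    rw [loss_agree _ hnd]
  rw [hf]
  have he : (PySem.Dict.empty : PySem.Dict (Int × Int) (Int × Int)) =
      PySem.Dict.mk ((PySem.Dict.empty : PySem.Dict (Int × Int) Int).items.map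
        (fun kv => (kv.1, (fun (k : Int × Int) (v : Int) => (v, pvLoss (pvPerWorker (pvMkCost cost_dict)) (pvMkCost cost_dict) k.1 k.2)) kv.1 kv.2))) := rfl
  rw [he, subdict_items (fun (k : Int × Int) (v : Int) => (v, pvLoss (pvPerWorker (pvMkCost cost_dict)) (pvMkCost cost_dict) k.1 k.2)) sublist PySem.Dict.empty]
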